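-- pv_equiv track=rewrite | github.com/TheoGicquel/L3-IrisaParser | irisaparser/title/extract.py | parse_potential_titles
-- ===== SOURCE A (Python) =====
-- def parse_potential_titles(lines_input, potential_titles):
--     #!TODO CLEANUP / COMMENT
--     lines = lines_input
--     res = []
--
--     for pot_title in potential_titles:
--         prev = ""
--
--         for line in lines:
--             raw_title = pot_title.replace(" ", "")
--             raw_line = line.replace(" ", "")
--
--             if raw_line == raw_title:
--                 res.append(line)
--
--             # try with previous iteration
--             prev_raw = prev.replace(" ", "")
--             concat_prev = prev_raw + raw_line
--
--             if concat_prev == raw_title: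
--                 res.append((prev + " " + line))
--
--             prev = line
--     return res
-- ===== SOURCE B (Python) =====
-- def parse_potential_titles(lines_input, potential_titles):
--     # Build, in one pass over the lines, the ordered list of (raw-key, output) events,
--     # then group them into a dict keyed by the space-stripped string; each title is
--     # then a single dict lookup instead of a scan of all lines.
--     events = []
--     prev = ""
--     for line in lines_input:
--         raw = line.replace(" ", "")
--         events.append((raw, line))
--         events.append((prev.replace(" ", "") + raw, prev + " " + line))
--         prev = line
--     index = {}
--     for key, out in events:
--         index.setdefault(key, []).append(out)
--     res = []
--     for t in potential_titles:
--         res.extend(index.get(t.replace(" ", ""), []))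
--     return res
-- ===== Notes on version B (the rewrite author's own statement) =====
-- stated objective: faster
-- what changed: One pass over the lines builds raw-string->matching-outputs groups in a dict, so each title is a single lookup instead of rescanning all lines per title.
import Mathlib
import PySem

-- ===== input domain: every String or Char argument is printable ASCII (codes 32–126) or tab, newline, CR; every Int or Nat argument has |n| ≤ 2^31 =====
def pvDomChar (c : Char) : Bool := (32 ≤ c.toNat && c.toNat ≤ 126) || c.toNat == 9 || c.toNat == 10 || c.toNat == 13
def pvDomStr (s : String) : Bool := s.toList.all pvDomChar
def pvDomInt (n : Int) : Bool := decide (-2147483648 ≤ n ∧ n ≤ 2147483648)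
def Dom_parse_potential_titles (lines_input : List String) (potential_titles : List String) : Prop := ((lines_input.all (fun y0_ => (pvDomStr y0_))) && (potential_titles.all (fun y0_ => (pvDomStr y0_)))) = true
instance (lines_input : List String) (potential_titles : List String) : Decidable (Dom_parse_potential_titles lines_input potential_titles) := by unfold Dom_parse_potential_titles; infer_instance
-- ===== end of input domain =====

-- B replaces A's rescan of all lines for every title by one pass that groups the
-- line/line-pair candidates in a dict keyed by the space-stripped string (faster).

-- ===== PORT A =====
def parse_potential_titles (lines_input : List String) (potential_titles : List String) : List String :=
  potential_titles.foldl (fun res pot_title =>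
    (lines_input.foldl (fun (st : List String × String) line =>
      let raw_title := PySem.Str.replace pot_title " " ""
      let raw_line := PySem.Str.replace line " " ""
      let res1 := if raw_line == raw_title then st.1 ++ [line] else st.1
      let prev_raw := PySem.Str.replace st.2 " " ""
      let concat_prev := prev_raw ++ raw_line
      let res2 := if concat_prev == raw_title then res1 ++ [st.2 ++ " " ++ line] else res1
      (res2, line)) (res, "")).1) []

-- ===== PORT B =====
def parse_potential_titles_alt (lines_input : List String) (potential_titles : List String) : List String :=
  let events := (lines_input.foldl (fun (st : List (String × String) × String) line =>
    let raw := PySem.Str.replace line " " ""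
    (st.1 ++ [(raw, line)] ++ [(PySem.Str.replace st.2 " " "" ++ raw, st.2 ++ " " ++ line)],
     line)) ([], "")).1
  let index := events.foldl (fun (d : PySem.Dict String (List String)) p =>
    d.modify p.1 [] (· ++ [p.2])) PySem.Dict.empty
  potential_titles.foldl (fun res t =>
    res ++ index.getD (PySem.Str.replace t " " "") []) []

-- ===== PRECONDITION & SPEC =====
def Spec_parse_potential_titles (lines_input : List String) (potential_titles : List String) (out : List String) : Prop := out = parse_potential_titles_alt lines_input potential_titles
instance (lines_input : List String) (potential_titles : List String) (out : List String) : Decidable (Spec_parse_potential_titles lines_input potential_titles out) := by unfold Spec_parse_potential_titles; infer_instance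

-- ===== CLAIM (what is proved, stated in full; the proofs are below) =====
def Claim_equal_parse_potential_titles : Prop := ∀ (lines_input : List String) (potential_titles : List String), Dom_parse_potential_titles lines_input potential_titles → Spec_parse_potential_titles lines_input potential_titles (parse_potential_titles lines_input potential_titles)

-- ===== LEMMAS AND PROOFS =====

/-- The ordered (key, output) candidates both programs generate from the lines. -/
def pvEv : String → List String → List (String × String)
  | _, [] => []
  | prev, l :: ls =>
    (PySem.Str.replace l " " "", l) ::
    (PySem.Str.replace prev " " "" ++ PySem.Str.replace l " " "", prev ++ " " ++ l) ::
    pvEv l ls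

theorem pvEv_B (ls : List String) : ∀ (prev : String) (acc : List (String × String)),
    (ls.foldl (fun (st : List (String × String) × String) line =>
      let raw := PySem.Str.replace line " " ""
      (st.1 ++ [(raw, line)] ++ [(PySem.Str.replace st.2 " " "" ++ raw, st.2 ++ " " ++ line)],
       line)) (acc, prev)).1 = acc ++ pvEv prev ls := by
  induction ls with
  | nil => intro prev acc; simp [pvEv]
  | cons l ls ih =>
    intro prev acc
    simp only [List.foldl_cons, pvEv, ih]
    simp

theorem pvEv_A (t : String) (ls : List String) : ∀ (prev : String) (res : List String),
    (ls.foldl (fun (st : List String × String) line =>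
      let raw_title := PySem.Str.replace t " " ""
      let raw_line := PySem.Str.replace line " " ""
      let res1 := if raw_line == raw_title then st.1 ++ [line] else st.1
      let prev_raw := PySem.Str.replace st.2 " " ""
      let concat_prev := prev_raw ++ raw_line
      let res2 := if concat_prev == raw_title then res1 ++ [st.2 ++ " " ++ line] else res1
      (res2, line)) (res, prev)).1
    = res ++ ((pvEv prev ls).filter (fun p => p.1 == PySem.Str.replace t " " "")).map (·.2) := by
  induction ls with
  | nil => intro prev res; simp [pvEv]
  | cons l ls ih =>
    intro prev res
    simp only [List.foldl_cons, pvEv, List.filter_cons, ih]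
    split_ifs <;> simp_all

theorem pv_perTitle (lines_input : List String) (res : List String) (t : String) :
    (lines_input.foldl (fun (st : List String × String) line =>
      let raw_title := PySem.Str.replace t " " ""
      let raw_line := PySem.Str.replace line " " ""
      let res1 := if raw_line == raw_title then st.1 ++ [line] else st.1
      let prev_raw := PySem.Str.replace st.2 " " ""
      let concat_prev := prev_raw ++ raw_line
      let res2 := if concat_prev == raw_title then res1 ++ [st.2 ++ " " ++ line] else res1
      (res2, line)) (res, "")).1
    = res ++ ((((lines_input.foldl (fun (st : List (String × String) × String) line =>
        let raw := PySem.Str.replace line " " ""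
        (st.1 ++ [(raw, line)] ++ [(PySem.Str.replace st.2 " " "" ++ raw, st.2 ++ " " ++ line)],
         line)) ([], "")).1).foldl (fun (d : PySem.Dict String (List String)) p =>
          d.modify p.1 [] (· ++ [p.2])) PySem.Dict.empty).getD (PySem.Str.replace t " " "") []) := by
  rw [pvEv_A, pvEv_B, PySem.Dict.getD_foldl_modify_append]
  simp

theorem pv_outer (g : List String → String → List String) (f : String → List String)
    (h : ∀ res t, g res t = res ++ f t) (ts : List String) : ∀ (acc : List String),
    ts.foldl g acc = ts.foldl (fun res t => res ++ f t) acc := by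
  induction ts with
  | nil => intro acc; rfl
  | cons t ts ih => intro acc; rw [List.foldl_cons, List.foldl_cons, h, ih]

-- ===== VERDICT (by name: the statement is the Claim_ definition above) =====
theorem parse_potential_titles_spec : Claim_equal_parse_potential_titles := by
  intro lines_input potential_titles _
  unfold Spec_parse_potential_titles parse_potential_titles parse_potential_titles_alt
  exact pv_outer _ _ (fun res t => pv_perTitle lines_input res t) potential_titles []
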